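-- pv_equiv track=rewrite | github.com/DuskTillDwan/Intro-To-Python | Assignment 6/csc242-901hw6.py | recPowProd
-- ===== SOURCE A (Python) =====
-- def recPowProd(k, n, p):
--     'find the product of the numbers between k and n to the pth power'
--     if k > n:
--         return 1
--     elif k == n:
--         return k**p
--     else:
--         prev = recPowProd(k+1, n, p)
--         sumation = (prev) * (k**p)
--         return sumation
--
--     pass
-- ===== SOURCE B (Python) =====
-- def recPowProd(k, n, p):
--     'find the product of the numbers between k and n to the pth power'
--     if k > n:
--         return 1
--     prod = 1
--     for i in range(k, n + 1):
--         prod *= i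
--     return prod ** p
-- ===== Notes on version B (the rewrite author's own statement) =====
-- stated objective: alternative
-- what changed: Replaces the per-factor-exponentiation recursion with a single iterative product of the range followed by one exponentiation, using (k*...*n)^p = k^p*...*n^p.
-- outside the precondition, e.g. on recPowProd(2, 3, -1): A returns 0.16666666666666666, B returns 0.16666666666666666
import Mathlib
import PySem

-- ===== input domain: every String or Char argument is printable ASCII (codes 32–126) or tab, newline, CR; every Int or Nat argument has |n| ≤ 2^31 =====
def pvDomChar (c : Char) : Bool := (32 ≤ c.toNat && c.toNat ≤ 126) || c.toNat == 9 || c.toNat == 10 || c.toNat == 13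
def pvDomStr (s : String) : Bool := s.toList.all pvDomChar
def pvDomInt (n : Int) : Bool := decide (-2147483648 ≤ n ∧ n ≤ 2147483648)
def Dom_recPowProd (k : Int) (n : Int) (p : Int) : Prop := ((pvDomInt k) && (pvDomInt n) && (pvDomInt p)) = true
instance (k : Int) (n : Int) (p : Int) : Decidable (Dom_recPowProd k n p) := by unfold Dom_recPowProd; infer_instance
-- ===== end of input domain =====

-- B replaces the per-factor-exponentiation recursion with one iterative product of the
-- range followed by a single exponentiation ((k*...*n)^p); objective: alternative algorithm.

-- ===== PORT A =====
def recPowProd (k : Int) (n : Int) (p : Int) : Int :=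
  if k > n then 1
  else if k = n then k ^ p.toNat
  else
    let prev := recPowProd (k + 1) n p
    let sumation := prev * k ^ p.toNat
    sumation
termination_by (n - k).toNat
decreasing_by omega

-- ===== PORT B =====
def recPowProd_alt (k : Int) (n : Int) (p : Int) : Int :=
  if k > n then 1
  else ((PySem.List.pyRange k (n + 1) 1).foldl (· * ·) 1) ^ p.toNat

-- ===== PRECONDITION & SPEC =====
-- Pre_ excludes k ≤ n with p < 0, where Python's ** produces a float (not an int), and
-- ranges deeper than CPython's recursion limit, where A raises RecursionError.
def Pre_recPowProd (k : Int) (n : Int) (p : Int) : Prop := (n < k ∨ 0 ≤ p) ∧ n - k < 900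
instance (k : Int) (n : Int) (p : Int) : Decidable (Pre_recPowProd k n p) := by
  unfold Pre_recPowProd; infer_instance
def pvWitness_recPowProd : Int × Int × Int := (2, 5, 3)
def Spec_recPowProd (k : Int) (n : Int) (p : Int) (out : Int) : Prop := out = recPowProd_alt k n p
instance (k : Int) (n : Int) (p : Int) (out : Int) : Decidable (Spec_recPowProd k n p out) := by unfold Spec_recPowProd; infer_instance

-- ===== CLAIM (what is proved, stated in full; the proofs are below) =====
def Claim_equal_recPowProd : Prop := ∀ (k : Int) (n : Int) (p : Int), Dom_recPowProd k n p → Pre_recPowProd k n p → Spec_recPowProd k n p (recPowProd k n p)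

-- ===== LEMMAS AND PROOFS =====

theorem foldl_mul_shift (l : List Int) : ∀ a : Int,
    l.foldl (· * ·) a = a * l.foldl (· * ·) 1 := by
  induction l with
  | nil => intro a; simp
  | cons x xs ih =>
    intro a
    simp only [List.foldl_cons]
    rw [ih (a * x), ih (1 * x)]
    ring

theorem recPowProd_eq_pow (p : Int) : ∀ (m : ℕ) (k n : Int), (n - k).toNat = m → k ≤ n →
    recPowProd k n p = ((PySem.List.pyRange k (n + 1) 1).foldl (· * ·) 1) ^ p.toNat := by
  intro m
  induction m with
  | zero =>
    intro k n hm hkn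
    have hk : k = n := by omega
    subst hk
    rw [recPowProd]
    simp [PySem.List.pyRange_one_singleton]
  | succ m ih =>
    intro k n hm hkn
    have hlt : k < n := by omega
    rw [recPowProd]
    have h1 : ¬ k > n := by omega
    have h2 : ¬ k = n := by omega
    simp only [h1, h2, if_false]
    rw [ih (k + 1) n (by omega) (by omega)]
    rw [PySem.List.pyRange_one_cons (by omega : k < n + 1)]
    simp only [List.foldl_cons]
    rw [foldl_mul_shift _ (1 * k)]
    rw [mul_pow]
    ring


-- ===== VERDICT (by name: the statement is the Claim_ definition above) =====
theorem recPowProd_spec : Claim_equal_recPowProd := by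
  intro k n p _ _
  unfold Spec_recPowProd recPowProd_alt
  by_cases h : k > n
  · rw [recPowProd]; simp [h]
  · simp only [h, if_false]
    exact recPowProd_eq_pow p (n - k).toNat k n rfl (by omega)
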